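-- pv_equiv track=rewrite | github.com/Luiz-Henrique28/lista-complexidade | Computabilidade-e-Complexidade-de-Algoritmos-main/python/2.py | afd_par_de_zeros
-- ===== SOURCE A (Python) =====
-- def afd_par_de_zeros(s):
--     estado = 'q0'
--     for char in s:
--         if estado == 'q0':
--             if char == '0':
--                 estado = 'q1'
--             elif char == '1':
--                 estado = 'q0'
--         elif estado == 'q1':
--             if char == '0':
--                 estado = 'q0'
--             elif char == '1':
--                 estado = 'q1'
--     return estado == 'q0'
-- ===== SOURCE B (Python) =====
-- def afd_par_de_zeros(s):
--     return s.count('0') % 2 == 0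
-- ===== Notes on version B (the rewrite author's own statement) =====
-- stated objective: simpler
-- what changed: Replaces the explicit two-state DFA loop with its closed form: the machine only toggles on a zero character, so the answer is whether the count of zero characters is even — one library count plus a parity test, no state machine.
import Mathlib
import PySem

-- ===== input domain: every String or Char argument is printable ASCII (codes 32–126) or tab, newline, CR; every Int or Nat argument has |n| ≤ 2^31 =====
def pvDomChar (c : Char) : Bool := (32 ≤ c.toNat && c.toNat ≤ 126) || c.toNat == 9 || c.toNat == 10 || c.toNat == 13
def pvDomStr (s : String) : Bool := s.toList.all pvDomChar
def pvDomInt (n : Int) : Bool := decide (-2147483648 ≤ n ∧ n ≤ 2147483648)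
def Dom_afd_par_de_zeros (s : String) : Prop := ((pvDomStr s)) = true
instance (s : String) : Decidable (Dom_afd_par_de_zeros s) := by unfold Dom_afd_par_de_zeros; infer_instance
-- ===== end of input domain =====

-- B replaces A's explicit two-state DFA loop with the closed form "the number of '0' characters is even" (objective: simpler).

-- ===== PORT A =====
-- one step of A's DFA loop body, branch for branch
def afdStep (estado : String) (char : Char) : String :=
  if estado = "q0" then
    (if char = '0' then "q1" else if char = '1' then "q0" else estado)
  else if estado = "q1" then
    (if char = '0' then "q0" else if char = '1' then "q1" else estado)
  else estado

def afd_par_de_zeros (s : String) : Bool :=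
  let estado := s.toList.foldl afdStep "q0"
  estado == "q0"

-- ===== PORT B =====
def afd_par_de_zeros_alt (s : String) : Bool :=
  PySem.Str.count s "0" % 2 == 0

-- ===== PRECONDITION & SPEC =====
def Spec_afd_par_de_zeros (s : String) (out : Bool) : Prop := out = afd_par_de_zeros_alt s
instance (s : String) (out : Bool) : Decidable (Spec_afd_par_de_zeros s out) := by unfold Spec_afd_par_de_zeros; infer_instance

-- ===== CLAIM (what is proved, stated in full; the proofs are below) =====
def Claim_equal_afd_par_de_zeros : Prop := ∀ (s : String), Dom_afd_par_de_zeros s → Spec_afd_par_de_zeros s (afd_par_de_zeros s)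

-- ===== LEMMAS AND PROOFS =====

-- substring count of the one-character pattern "0" is the character count
theorem count_go_single (l : List Char) : ∀ (fuel acc : Nat), l.length ≤ fuel →
    PySem.Chars.count.go ['0'] fuel l acc = acc + l.count '0' := by
  induction l with
  | nil =>
    intro fuel acc _
    cases fuel <;> simp [PySem.Chars.count.go]
  | cons h t ih =>
    intro fuel acc hle
    cases fuel with
    | zero => simp at hle
    | succ f =>
      by_cases hh : h = '0'
      · subst hh
        simp [PySem.Chars.count.go, List.isPrefixOf, ih f (acc + 1) (by simpa using hle)]
        omega
      · have h0 : ¬ ('0' = h) := fun e => hh e.symm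
        simp [PySem.Chars.count.go, List.isPrefixOf, h0, hh,
          ih f acc (by simpa using hle)]

theorem count_single (l : List Char) : PySem.Chars.count l ['0'] = l.count '0' := by
  simp [PySem.Chars.count, count_go_single l l.length 0 le_rfl]

-- the DFA state after a list is determined by the parity of the number of '0's
theorem foldl_afdStep (l : List Char) :
    l.foldl afdStep "q0" = (if l.count '0' % 2 = 0 then "q0" else "q1") ∧
    l.foldl afdStep "q1" = (if l.count '0' % 2 = 0 then "q1" else "q0") := by
  induction l with
  | nil => simp
  | cons h t ih =>
    by_cases hh : h = '0'
    · subst hh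
      rcases Nat.mod_two_eq_zero_or_one (t.count '0') with h0 | h1
      · have h1' : (t.count '0' + 1) % 2 = 1 := by omega
        simp [afdStep, ih.1, ih.2, h0, h1']
      · have h0' : (t.count '0' + 1) % 2 = 0 := by omega
        simp [afdStep, ih.1, ih.2, h1, h0']
    · have hstep0 : afdStep "q0" h = "q0" := by
        simp [afdStep, hh]
      have hstep1 : afdStep "q1" h = "q1" := by
        simp [afdStep, hh]
      simp [List.foldl_cons, hstep0, hstep1, hh, ih.1, ih.2]

-- ===== VERDICT (by name: the statement is the Claim_ definition above) =====
theorem afd_par_de_zeros_spec : Claim_equal_afd_par_de_zeros := by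
  intro s _
  unfold Spec_afd_par_de_zeros afd_par_de_zeros afd_par_de_zeros_alt
  have hc : PySem.Str.count s "0" = s.toList.count '0' := by
    simpa using count_single s.toList
  rw [hc, (foldl_afdStep s.toList).1]
  by_cases h : s.toList.count '0' % 2 = 0 <;> simp [h]
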